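-- pv_equiv track=rewrite | github.com/elzie23/Zadaca-AI | osmi.py | znakovi_stringova
-- ===== SOURCE A (Python) =====
-- def znakovi_stringova(rjecnik):
--     novi_rjecnik={}
--
--     for s in rjecnik:
--         for c in s:
--             if c not in novi_rjecnik:
--                 novi_rjecnik[c]=[]
--
--             if s not in novi_rjecnik[c]:
--                 novi_rjecnik[c].append(s)
--
--     return novi_rjecnik
-- ===== SOURCE B (Python) =====
-- def znakovi_stringova(rjecnik):
--     # Two-phase: collect distinct chars in encounter order, then rescan the
--     # distinct strings once per char.
--     chars = dict.fromkeys(c for s in rjecnik for c in s)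
--     strs = list(dict.fromkeys(rjecnik))
--     return {c: [s for s in strs if c in s] for c in chars}
-- ===== Notes on version B (the rewrite author's own statement) =====
-- stated objective: faster
-- what changed: A builds the dict in one interleaved pass, re-scanning the value list ('if s not in novi_rjecnik[c]') for every character occurrence; B deduplicates the characters and the strings once via dict.fromkeys and then builds each value with one comprehension over the distinct strings, removing the per-character list scans.
import Mathlib
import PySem

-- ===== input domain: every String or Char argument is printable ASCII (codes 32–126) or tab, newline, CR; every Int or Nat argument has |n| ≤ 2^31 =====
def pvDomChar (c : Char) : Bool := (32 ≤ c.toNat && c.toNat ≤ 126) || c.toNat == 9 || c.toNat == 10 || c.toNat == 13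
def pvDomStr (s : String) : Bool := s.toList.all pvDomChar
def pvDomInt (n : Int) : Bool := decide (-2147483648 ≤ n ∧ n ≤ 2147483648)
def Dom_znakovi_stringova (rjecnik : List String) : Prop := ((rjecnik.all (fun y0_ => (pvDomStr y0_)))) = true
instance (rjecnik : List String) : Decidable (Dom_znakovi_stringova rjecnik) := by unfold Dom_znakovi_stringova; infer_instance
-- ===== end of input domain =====

-- B replaces A's single interleaved dict-building pass (which re-scans the value list
-- for every character occurrence) by two phases: dedup the characters and strings once,
-- then build each value by one scan of the distinct strings (objective: faster,
-- measured).

-- ===== PORT A =====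
-- A's inner loop body: one character c of the current string s against the dict
-- (keys are the one-character strings Python uses as dict keys).
def pvStepA (s : String) (d : PySem.Dict String (List String)) (c : Char) :
    PySem.Dict String (List String) :=
  let d1 := if d.contains c.toString then d else d.insert c.toString []
  if s ∈ d1.getD c.toString [] then d1
  else d1.insert c.toString (d1.getD c.toString [] ++ [s])

def znakovi_stringova (rjecnik : List String) : List (String × List String) :=
  (rjecnik.foldl (fun d s => s.toList.foldl (pvStepA s) d) PySem.Dict.empty).items

-- ===== PORT B =====
-- Source B: chars = dict.fromkeys(all chars), strs = list(dict.fromkeys(rjecnik)),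
-- {c: [s for s in strs if c in s] for c in chars}  ('c in s' for a 1-char c is
-- exactly character membership, ported as s.toList.contains c).
def znakovi_stringova_alt (rjecnik : List String) : List (String × List String) :=
  let chars := PySem.List.dedup (rjecnik.flatMap (fun s => s.toList))
  let strs := PySem.List.dedup rjecnik
  chars.map (fun c => (c.toString, strs.filter (fun s => s.toList.contains c)))

-- ===== PRECONDITION & SPEC =====
def Spec_znakovi_stringova (rjecnik : List String) (out : List (String × List String)) : Prop := out = znakovi_stringova_alt rjecnik
instance (rjecnik : List String) (out : List (String × List String)) : Decidable (Spec_znakovi_stringova rjecnik out) := by unfold Spec_znakovi_stringova; infer_instance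

-- ===== CLAIM (what is proved, stated in full; the proofs are below) =====
def Claim_equal_znakovi_stringova : Prop := ∀ (rjecnik : List String), Dom_znakovi_stringova rjecnik → Spec_znakovi_stringova rjecnik (znakovi_stringova rjecnik)

-- ===== LEMMAS AND PROOFS =====

lemma pv_toString_eq_iff (a b : Char) : (a.toString = b.toString) ↔ a = b := by
  constructor
  · intro h; have := congrArg String.toList h; simpa using this
  · intro h; rw [h]

lemma pv_toString_beq (a b : Char) : (a.toString == b.toString) = (a == b) := by
  rw [Bool.eq_iff_iff]
  simp only [beq_iff_eq]
  exact pv_toString_eq_iff a b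

-- lookup in a dict whose items are a map over a list of characters
lemma pv_get?_map (ks : List Char) (v : Char → List String) (c : Char) :
    (PySem.Dict.mk (ks.map (fun a => (a.toString, v a)))).get? c.toString
      = if c ∈ ks then some (v c) else none := by
  induction ks with
  | nil => simp [PySem.Dict.get?]
  | cons a ks ih =>
    simp only [List.map_cons, PySem.Dict.get?_mk_cons, ih, pv_toString_beq]
    by_cases h : a = c
    · simp [h]
    · simp [beq_eq_false_iff_ne.mpr h, Ne.symm h]

lemma pv_dedup_append_singleton {α : Type} [BEq α] [LawfulBEq α] (xs : List α) (x : α) :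
    PySem.List.dedup (xs ++ [x])
      = if x ∈ xs then PySem.List.dedup xs else PySem.List.dedup xs ++ [x] := by
  simp [PySem.List.dedup_eq_ofList, PySem.Set.ofList_append_singleton,
    PySem.Set.add_eq_ite, PySem.Set.mem_ofList]

-- the dict A has built after processing the strings of l and then the characters cs
-- of the current string s
def pvItems (l : List String) (s : String) (cs : List Char) : List (String × List String) :=
  (PySem.List.dedup (l.flatMap (fun t => t.toList) ++ cs)).map
    (fun c => (c.toString,
      (PySem.List.dedup (l ++ if c ∈ cs then [s] else [])).filter
        (fun t => t.toList.contains c)))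

lemma pv_L1 (l : List String) (s : String) (cs : List Char) (c' : Char)
    (hmem : c' ∈ l.flatMap (fun t => t.toList) ++ cs) (hsl : c' ∉ cs → s ∈ l) :
    pvItems l s (cs ++ [c']) = pvItems l s cs := by
  unfold pvItems
  rw [← List.append_assoc, pv_dedup_append_singleton, if_pos hmem]
  apply List.map_congr_left
  intro a _
  by_cases h : a = c'
  · subst h
    by_cases hcs : a ∈ cs
    · simp [hcs]
    · simp only [hcs, if_false, List.append_nil, List.mem_append, List.mem_singleton, or_true,
        if_true]
      rw [pv_dedup_append_singleton, if_pos (hsl hcs)]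
  · have : (a ∈ cs ++ [c']) ↔ a ∈ cs := by simp [h]
    simp only [this]

lemma pv_L2 (l : List String) (s : String) (cs : List Char) (c' : Char)
    (hmem : c' ∈ l.flatMap (fun t => t.toList) ++ cs) (hcs : c' ∉ cs) (hsl : s ∉ l)
    (hc : c' ∈ s.toList) :
    pvItems l s (cs ++ [c'])
      = (pvItems l s cs).map (fun p =>
          if p.1 == c'.toString then
            (c'.toString,
              ((PySem.List.dedup (l ++ if c' ∈ cs then [s] else [])).filter
                (fun t => t.toList.contains c')) ++ [s])
          else p) := by
  unfold pvItems
  rw [← List.append_assoc, pv_dedup_append_singleton, if_pos hmem, List.map_map]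
  apply List.map_congr_left
  intro a _
  simp only [Function.comp_apply, pv_toString_beq]
  by_cases h : a = c'
  · subst h
    simp only [BEq.rfl, if_true, hcs, if_false, List.append_nil, List.mem_append,
      List.mem_singleton, or_true, if_true]
    rw [pv_dedup_append_singleton, if_neg hsl, List.filter_append]
    simp [hc]
  · have hne : (a == c') = false := beq_eq_false_iff_ne.mpr h
    have : (a ∈ cs ++ [c']) ↔ a ∈ cs := by simp [h]
    simp [hne, this]

lemma pv_L3 (l : List String) (s : String) (cs : List Char) (c' : Char)
    (hmem : c' ∉ l.flatMap (fun t => t.toList) ++ cs) (hc : c' ∈ s.toList) :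
    pvItems l s (cs ++ [c']) = pvItems l s cs ++ [(c'.toString, [s])] := by
  have hflat : c' ∉ l.flatMap (fun t => t.toList) := fun h => hmem (by simp [h])
  have hcs : c' ∉ cs := fun h => hmem (by simp [h])
  have hsl : s ∉ l := fun h => hflat (List.mem_flatMap.mpr ⟨s, h, hc⟩)
  unfold pvItems
  rw [← List.append_assoc, pv_dedup_append_singleton, if_neg hmem, List.map_append]
  congr 1
  · apply List.map_congr_left
    intro a ha
    have hane : a ≠ c' := by
      intro h; subst h
      exact hmem (by simpa [PySem.List.mem_dedup] using ha)
    have : (a ∈ cs ++ [c']) ↔ a ∈ cs := by simp [hane]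
    simp only [this]
  · simp only [List.map_cons, List.map_nil, List.mem_append, List.mem_singleton, or_true, if_true]
    rw [pv_dedup_append_singleton, if_neg hsl, List.filter_append]
    simp [hc]
    intro a ha hca
    exact hflat (List.mem_flatMap.mpr ⟨a, ha, hca⟩)

lemma pv_step (l : List String) (s : String) (cs : List Char) (c' : Char)
    (hc : c' ∈ s.toList) :
    pvStepA s (PySem.Dict.mk (pvItems l s cs)) c' = PySem.Dict.mk (pvItems l s (cs ++ [c'])) := by
  have hget : (PySem.Dict.mk (pvItems l s cs)).get? c'.toString
      = if c' ∈ PySem.List.dedup (l.flatMap (fun t => t.toList) ++ cs) then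
          some ((PySem.List.dedup (l ++ if c' ∈ cs then [s] else [])).filter
            (fun t => t.toList.contains c'))
        else none := pv_get?_map _ _ c'
  unfold pvStepA
  by_cases hK : c' ∈ PySem.List.dedup (l.flatMap (fun t => t.toList) ++ cs)
  · rw [if_pos hK] at hget
    have hcont : (PySem.Dict.mk (pvItems l s cs)).contains c'.toString = true := by
      rw [PySem.Dict.contains_eq_isSome_get?, hget]; rfl
    have hgetD : (PySem.Dict.mk (pvItems l s cs)).getD c'.toString []
        = (PySem.List.dedup (l ++ if c' ∈ cs then [s] else [])).filter
            (fun t => t.toList.contains c') := by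
      rw [PySem.Dict.getD_eq_get?_getD, hget]; rfl
    have hmem : c' ∈ l.flatMap (fun t => t.toList) ++ cs := by
      simpa [PySem.List.mem_dedup] using hK
    simp only [hcont, if_true, hgetD]
    by_cases hs : s ∈ (PySem.List.dedup (l ++ if c' ∈ cs then [s] else [])).filter
        (fun t => t.toList.contains c')
    · rw [if_pos hs]
      congr 1
      refine (pv_L1 l s cs c' hmem (fun hcs => ?_)).symm
      rw [if_neg hcs, List.append_nil] at hs
      have hsd : s ∈ PySem.List.dedup l := List.mem_of_mem_filter hs
      simpa [PySem.List.mem_dedup] using hsd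
    · rw [if_neg hs]
      have hcs : c' ∉ cs := by
        intro hcsmem
        apply hs
        rw [if_pos hcsmem]
        exact List.mem_filter.mpr
          ⟨by simp, by simpa using hc⟩
      rw [if_neg hcs, List.append_nil] at hs
      have hsl : s ∉ l := by
        intro hslmem
        exact hs (List.mem_filter.mpr
          ⟨by simpa [PySem.List.mem_dedup] using hslmem, by simpa using hc⟩)
      apply PySem.Dict.ext
      rw [PySem.Dict.items_insert_of_contains _ _ hcont]
      show (pvItems l s cs).map _ = (pvItems l s (cs ++ [c']))
      rw [pv_L2 l s cs c' hmem hcs hsl hc]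
  · rw [if_neg hK] at hget
    have hcont : (PySem.Dict.mk (pvItems l s cs)).contains c'.toString = false := by
      rw [PySem.Dict.contains_eq_isSome_get?, hget]; rfl
    have hmem : c' ∉ l.flatMap (fun t => t.toList) ++ cs := by
      simpa [PySem.List.mem_dedup] using hK
    simp only [hcont, Bool.false_eq_true, if_false]
    rw [PySem.Dict.getD_insert_self]
    simp only [List.not_mem_nil, if_false, List.nil_append]
    rw [PySem.Dict.insert_insert_self]
    apply PySem.Dict.ext
    rw [PySem.Dict.items_insert_of_not_contains _ _ hcont]
    show pvItems l s cs ++ [(c'.toString, [s])] = pvItems l s (cs ++ [c'])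
    exact (pv_L3 l s cs c' hmem hc).symm

lemma pv_fold (l : List String) (s : String) (cs2 : List Char) :
    ∀ cs1, (∀ c ∈ cs2, c ∈ s.toList) →
    cs2.foldl (pvStepA s) (PySem.Dict.mk (pvItems l s cs1))
      = PySem.Dict.mk (pvItems l s (cs1 ++ cs2)) := by
  induction cs2 with
  | nil => intro cs1 _; simp
  | cons c cs ih =>
    intro cs1 h
    simp only [List.foldl_cons]
    rw [pv_step l s cs1 c (h c (by simp)), ih (cs1 ++ [c]) (fun x hx => h x (by simp [hx]))]
    simp

lemma pv_items_nil (l : List String) (s : String) :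
    pvItems l s [] = znakovi_stringova_alt l := by
  simp [pvItems, znakovi_stringova_alt]

lemma pv_items_full (l : List String) (s : String) :
    pvItems l s s.toList = znakovi_stringova_alt (l ++ [s]) := by
  unfold pvItems znakovi_stringova_alt
  have hflat : (l ++ [s]).flatMap (fun t => t.toList)
      = l.flatMap (fun t => t.toList) ++ s.toList := by simp
  rw [hflat]
  apply List.map_congr_left
  intro c _
  by_cases h : c ∈ s.toList
  · simp [h]
  · simp only [h, if_false, List.append_nil]
    congr 1
    rw [pv_dedup_append_singleton]
    by_cases hsl : s ∈ l
    · simp [hsl]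
    · rw [if_neg hsl, List.filter_append]
      simp [h]

lemma pv_main (l : List String) :
    l.foldl (fun d s => s.toList.foldl (pvStepA s) d) PySem.Dict.empty
      = PySem.Dict.mk (znakovi_stringova_alt l) := by
  induction l using List.reverseRecOn with
  | nil => rfl
  | append_singleton l s ih =>
    rw [List.foldl_append, List.foldl_cons, List.foldl_nil, ih, ← pv_items_nil l s,
      pv_fold l s s.toList [] (fun _ h => h)]
    simp [pv_items_full]

-- ===== VERDICT (by name: the statement is the Claim_ definition above) =====
theorem znakovi_stringova_spec : Claim_equal_znakovi_stringova := by
  intro rjecnik _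
  show znakovi_stringova rjecnik = znakovi_stringova_alt rjecnik
  unfold znakovi_stringova
  rw [pv_main]
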